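-- pv_equiv track=rewrite | github.com/rsbowen/homework_examples | source_code/grading/coffeeshop_alice.py | busiest_time
-- ===== SOURCE A (Python) =====
-- def busiest_time(customer_entry_data):
--   # customer_entry_data is a list of tuples:
--   # (entry_time, exit_time).
--   # entry_time and exit_time are integers (think of them as minutes past some reference, if you like).
--   # Your code should return a triple of integers:
--   # (start, end, number)
--   # which indicate the period during which the coffeeshop was most busy, and how many people were there.
--   # In case of a tie, your code should return the first busy period.
--
--   # YOUR CODE HERE!
--   entry_times = [(d[0], 1) for d in customer_entry_data]
--   exit_times = [(d[1], -1) for d in customer_entry_data]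
--   interleaved = (entry_times + exit_times)
--   interleaved.sort()
--
--   num_patrons = 0
--   max_num_patrons = 0
--   busy_start = 0
--   busy_end = 0
--   for i in range(len(interleaved)):
--     num_patrons += interleaved[i][1]
--     if num_patrons > max_num_patrons:
--       max_num_patrons = num_patrons
--       busy_start = interleaved[i][0]
--       busy_end = interleaved[i+1][0]
--
--   return (busy_start, busy_end, max_num_patrons)
-- ===== SOURCE B (Python) =====
-- def busiest_time(customer_entry_data):
--   # Two-pointer sweep over separately sorted entry and exit times
--   # (exit consumed first on ties, matching event ordering); trailing
--   # exits after the last entry can never raise the count, so they are skipped.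
--   entries = sorted(d[0] for d in customer_entry_data)
--   exits = sorted(d[1] for d in customer_entry_data)
--   n = len(entries)
--   i = j = 0
--   num = best = 0
--   bs = be = 0
--   while i < n:
--     if j < n and exits[j] <= entries[i]:
--       num -= 1
--       j += 1
--     else:
--       t = entries[i]
--       i += 1
--       num += 1
--       if num > best:
--         best = num
--         bs = t
--         be = exits[j] if i == n else min(entries[i], exits[j])
--   return (bs, be, best)
-- ===== Notes on version B (the rewrite author's own statement) =====
-- stated objective: alternative
-- what changed: Replaces A's build-and-lexicographically-sort of one interleaved (time, +/-1) event list followed by an indexed loop with a lookahead, by sorting entry and exit times into two separate plain lists and doing a two-pointer merge sweep (exit consumed first on ties) that skips the trailing exits after the last entry.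
import Mathlib
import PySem

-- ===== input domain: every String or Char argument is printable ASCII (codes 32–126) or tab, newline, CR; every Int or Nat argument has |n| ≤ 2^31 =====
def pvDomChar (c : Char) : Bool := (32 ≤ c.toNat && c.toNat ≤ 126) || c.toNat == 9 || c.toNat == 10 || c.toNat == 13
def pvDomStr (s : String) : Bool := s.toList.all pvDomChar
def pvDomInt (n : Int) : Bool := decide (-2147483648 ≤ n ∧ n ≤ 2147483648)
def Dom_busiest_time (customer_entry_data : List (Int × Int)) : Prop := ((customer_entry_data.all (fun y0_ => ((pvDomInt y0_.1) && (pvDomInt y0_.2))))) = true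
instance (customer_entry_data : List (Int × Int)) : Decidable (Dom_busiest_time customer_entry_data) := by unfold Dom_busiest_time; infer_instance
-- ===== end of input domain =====

-- B replaces A's sort of one interleaved (time, ±1) event list by a two-pointer sweep
-- over separately sorted entry and exit times (objective: alternative decomposition).

-- ===== PORT A =====
-- literal transliteration of A: tag events, concatenate, tuple-sort (sorted2 = Python's
-- lexicographic list.sort), then a single indexed loop with a lookahead at
-- interleaved[i+1].  The lookahead is ported with pyGetD and default (0, 0): Python
-- would raise IndexError at i = len-1, but the branch reading it is unreachable there
-- (the patron count is back to 0 at the last event), so the default is never returned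
-- and the port is exact wherever the Python returns.
def busiest_time (customer_entry_data : List (Int × Int)) : Int × Int × Int :=
  let entry_times := customer_entry_data.map (fun d => (d.1, (1 : Int)))
  let exit_times := customer_entry_data.map (fun d => (d.2, (-1 : Int)))
  let interleaved := PySem.List.sorted2 (entry_times ++ exit_times) (fun p => p.1) (fun p => p.2)
  let s := (PySem.List.pyRange 0 (interleaved.length : Int) 1).foldl
    (fun (s : Int × Int × Int × Int) i =>
      let num := s.1 + (PySem.List.pyGetD interleaved i ((0 : Int), (0 : Int))).2
      if s.2.1 < num then
        (num, num, (PySem.List.pyGetD interleaved i ((0 : Int), (0 : Int))).1,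
          (PySem.List.pyGetD interleaved (i + 1) ((0 : Int), (0 : Int))).1)
      else (num, s.2.1, s.2.2.1, s.2.2.2))
    (0, 0, 0, 0)
  (s.2.2.1, s.2.2.2, s.2.1)

-- ===== PORT B =====
-- Source B's `exits[j] if i == n else min(entries[i], exits[j])` with the remaining entry
-- list and the current head exit time (x plays the role of exits[j])
def pvNext (ents : List Int) (x : Int) : Int :=
  match ents with
  | [] => x
  | e' :: _ => min e' x

-- the two-pointer while-loop of Source B: first argument = remaining entry times
-- (entries[i:]), second = remaining exit times (exits[j:]); the loop ends when the
-- entries are exhausted.  In the exts = [] branch Python's exits[j] would raise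
-- IndexError if the (provably unreachable there) record update fired; that read is
-- ported with default 0.
def bLoop : List Int → List Int → Int → Int → Int → Int → Int × Int × Int
  | [], _, _, best, bs, be => (bs, be, best)
  | e :: ents, x :: exts, num, best, bs, be =>
      if x ≤ e then bLoop (e :: ents) exts (num - 1) best bs be
      else
        let num' := num + 1
        if best < num' then bLoop ents (x :: exts) num' num' e (pvNext ents x)
        else bLoop ents (x :: exts) num' best bs be
  | e :: ents, [], num, best, bs, be =>
      let num' := num + 1
      if best < num' then bLoop ents [] num' num' e (pvNext ents 0)
      else bLoop ents [] num' best bs be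
  termination_by ents exts => ents.length + exts.length

def busiest_time_alt (customer_entry_data : List (Int × Int)) : Int × Int × Int :=
  let entries := PySem.List.sorted (customer_entry_data.map (fun d => d.1)) (fun t => t)
  let exits := PySem.List.sorted (customer_entry_data.map (fun d => d.2)) (fun t => t)
  bLoop entries exits 0 0 0 0

-- ===== PRECONDITION & SPEC =====
def Spec_busiest_time (customer_entry_data : List (Int × Int)) (out : Int × Int × Int) : Prop := out = busiest_time_alt customer_entry_data
instance (customer_entry_data : List (Int × Int)) (out : Int × Int × Int) : Decidable (Spec_busiest_time customer_entry_data out) := by unfold Spec_busiest_time; infer_instance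

-- ===== CLAIM (what is proved, stated in full; the proofs are below) =====
def Claim_equal_busiest_time : Prop := ∀ (customer_entry_data : List (Int × Int)), Dom_busiest_time customer_entry_data → Spec_busiest_time customer_entry_data (busiest_time customer_entry_data)

-- ===== LEMMAS AND PROOFS =====

-- proof-side model of A's sorted interleaved list: the tie-aware merge of the two
-- sorted time lists into (time, ±1) events, exits first on equal times
def pvMerge : List Int → List Int → List (Int × Int)
  | ents, [] => ents.map (fun e => (e, (1 : Int)))
  | [], x :: exts => (x, (-1 : Int)) :: pvMerge [] exts
  | e :: ents, x :: exts =>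
      if x ≤ e then (x, (-1 : Int)) :: pvMerge (e :: ents) exts
      else (e, (1 : Int)) :: pvMerge ents (x :: exts)
  termination_by ents exts => ents.length + exts.length

-- A's lookahead interleaved[i+1][0], with A's port default for the empty tail
def pvLook (rest : List (Int × Int)) : Int :=
  match rest with
  | [] => 0
  | q :: _ => q.1

-- proof-side model of A's loop as structural recursion with a one-element lookahead
def pvGoA : List (Int × Int) → Int × Int × Int × Int → Int × Int × Int × Int
  | [], s => s
  | p :: rest, s =>
      let num := s.1 + p.2
      if s.2.1 < num then pvGoA rest (num, num, p.1, pvLook rest)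
      else pvGoA rest (num, s.2.1, s.2.2.1, s.2.2.2)

lemma pvMerge_nil_left (exts : List Int) : pvMerge [] exts = exts.map (fun x => (x, (-1 : Int))) := by
  induction exts with
  | nil => simp [pvMerge]
  | cons x exts ih => simp [pvMerge, ih]

lemma pvMerge_perm (ents exts : List Int) :
    (pvMerge ents exts).Perm (ents.map (fun e => (e, (1 : Int))) ++ exts.map (fun x => (x, (-1 : Int)))) := by
  induction ents, exts using pvMerge.induct with
  | case1 ents => simp [pvMerge]
  | case2 x exts ih => simpa [pvMerge] using List.Perm.cons (x, (-1 : Int)) ih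
  | case3 e ents x exts h ih =>
      simp only [pvMerge, if_pos h]
      exact (List.Perm.cons (x, (-1 : Int)) ih).trans List.perm_middle.symm
  | case4 e ents x exts h ih =>
      simp only [pvMerge, if_neg h, List.map_cons]
      exact List.Perm.cons (e, (1 : Int)) ih

lemma toLex_le_iff (a b : Int × Int) : toLex a ≤ toLex b ↔ a.1 < b.1 ∨ (a.1 = b.1 ∧ a.2 ≤ b.2) :=
  Prod.Lex.le_iff

lemma mem_pvMerge {z : Int × Int} {ents exts : List Int} (hz : z ∈ pvMerge ents exts) :
    (z.2 = 1 ∧ z.1 ∈ ents) ∨ (z.2 = -1 ∧ z.1 ∈ exts) := by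
  have := (pvMerge_perm ents exts).mem_iff.mp hz
  rcases List.mem_append.mp this with h | h
  · rcases List.mem_map.mp h with ⟨a, ha, rfl⟩; exact Or.inl ⟨rfl, ha⟩
  · rcases List.mem_map.mp h with ⟨a, ha, rfl⟩; exact Or.inr ⟨rfl, ha⟩

lemma pvMerge_pairwise (ents exts : List Int)
    (he : ents.Pairwise (fun a b => a ≤ b)) (hx : exts.Pairwise (fun a b => a ≤ b)) :
    (pvMerge ents exts).Pairwise (fun a b => toLex a ≤ toLex b) := by
  induction ents, exts using pvMerge.induct with
  | case1 ents =>
      rw [pvMerge]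
      exact List.pairwise_map.mpr (he.imp (fun {a b} hab => (toLex_le_iff _ _).mpr (by omega)))
  | case2 x exts ih =>
      rw [pvMerge]
      refine List.Pairwise.cons ?_ (ih he hx.tail)
      intro z hz
      rcases mem_pvMerge hz with ⟨h2, h1⟩ | ⟨h2, h1⟩
      · simp at h1
      · have : x ≤ z.1 := List.rel_of_pairwise_cons hx h1
        exact (toLex_le_iff _ _).mpr (by omega)
  | case3 e ents x exts h ih =>
      rw [pvMerge, if_pos h]
      refine List.Pairwise.cons ?_ (ih he hx.tail)
      intro z hz
      rcases mem_pvMerge hz with ⟨h2, h1⟩ | ⟨h2, h1⟩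
      · have : e ≤ z.1 := by
          rcases List.mem_cons.mp h1 with rfl | h1
          · exact le_rfl
          · exact List.rel_of_pairwise_cons he h1
        exact (toLex_le_iff _ _).mpr (by omega)
      · have : x ≤ z.1 := List.rel_of_pairwise_cons hx h1
        exact (toLex_le_iff _ _).mpr (by omega)
  | case4 e ents x exts h ih =>
      rw [pvMerge, if_neg h]
      refine List.Pairwise.cons ?_ (ih he.tail hx)
      intro z hz
      rcases mem_pvMerge hz with ⟨h2, h1⟩ | ⟨h2, h1⟩
      · have : e ≤ z.1 := List.rel_of_pairwise_cons he h1
        exact (toLex_le_iff _ _).mpr (by omega)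
      · have : x ≤ z.1 := by
          rcases List.mem_cons.mp h1 with rfl | h1
          · exact le_rfl
          · exact List.rel_of_pairwise_cons hx h1
        exact (toLex_le_iff _ _).mpr (by omega)

-- A's tuple sort is the sort by the lexicographic key
lemma sorted2_eq_sorted_toLex (xs : List (Int × Int)) :
    PySem.List.sorted2 xs (fun p => p.1) (fun p => p.2) = PySem.List.sorted xs (fun p => toLex p) := by
  rw [PySem.List.sorted_eq_foldl_insertBy]
  unfold PySem.List.sorted2
  simp only []
  congr 1
  funext acc p
  congr 1
  funext a b
  have : (toLex a < toLex b) ↔ (a.1 < b.1 ∨ a.1 = b.1 ∧ a.2 < b.2) := Prod.Lex.lt_iff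
  by_cases h1 : a.1 < b.1 <;> by_cases h2 : b.1 < a.1 <;> by_cases h3 : a.2 < b.2 <;>
    simp [h1, h2, h3, this] <;> omega

lemma sorted2_eq_pvMerge (xs : List (Int × Int)) :
    PySem.List.sorted2
      ((xs.map (fun d => (d.1, (1 : Int)))) ++ (xs.map (fun d => (d.2, (-1 : Int)))))
      (fun p => p.1) (fun p => p.2)
    = pvMerge (PySem.List.sorted (xs.map (fun d => d.1)) (fun t => t))
              (PySem.List.sorted (xs.map (fun d => d.2)) (fun t => t)) := by
  rw [sorted2_eq_sorted_toLex]
  set sE := PySem.List.sorted (xs.map (fun d => d.1)) (fun t => t) with hsE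
  set sX := PySem.List.sorted (xs.map (fun d => d.2)) (fun t => t) with hsX
  apply PySem.List.eq_of_perm_of_pairwise_le_of_injective (fun p : Int × Int => toLex p)
    (fun a b hab => by simpa using hab)
  · -- both sides are permutations of the raw interleaved list
    have hE : (sE.map (fun e => (e, (1 : Int)))).Perm (xs.map (fun d => (d.1, (1 : Int)))) := by
      have h1 : sE.Perm (xs.map (fun d => d.1)) := PySem.List.sorted_perm _ _ _
      simpa [List.map_map, Function.comp] using h1.map (fun e => (e, (1 : Int)))
    have hX : (sX.map (fun x => (x, (-1 : Int)))).Perm (xs.map (fun d => (d.2, (-1 : Int)))) := by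
      have h1 : sX.Perm (xs.map (fun d => d.2)) := PySem.List.sorted_perm _ _ _
      simpa [List.map_map, Function.comp] using h1.map (fun x => (x, (-1 : Int)))
    have hA : (pvMerge sE sX).Perm
        ((xs.map (fun d => (d.1, (1 : Int)))) ++ (xs.map (fun d => (d.2, (-1 : Int))))) :=
      (pvMerge_perm sE sX).trans (hE.append hX)
    exact (PySem.List.sorted_perm _ _ _).trans hA.symm
  · exact PySem.List.sorted_pairwise _ _
  · exact pvMerge_pairwise sE sX
      (by simpa using PySem.List.sorted_pairwise (xs.map (fun d => d.1)) (fun t => t))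
      (by simpa using PySem.List.sorted_pairwise (xs.map (fun d => d.2)) (fun t => t))

-- A's indexed loop with lookahead equals the structural recursion pvGoA
lemma foldA_eq_pvGoA_aux (M : List (Int × Int)) (k : Nat) (hk : k ≤ M.length) (s : Int × Int × Int × Int) :
    (PySem.List.pyRange (k : Int) (M.length : Int) 1).foldl
      (fun (s : Int × Int × Int × Int) i =>
        let num := s.1 + (PySem.List.pyGetD M i ((0 : Int), (0 : Int))).2
        if s.2.1 < num then
          (num, num, (PySem.List.pyGetD M i ((0 : Int), (0 : Int))).1,
            (PySem.List.pyGetD M (i + 1) ((0 : Int), (0 : Int))).1)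
        else (num, s.2.1, s.2.2.1, s.2.2.2)) s
    = pvGoA (M.drop k) s := by
  induction hn : M.length - k generalizing k s with
  | zero =>
      have : k = M.length := by omega
      subst this
      rw [PySem.List.pyRange_one_eq_nil (by omega), List.drop_length]
      rfl
  | succ n ih =>
      have hklt : k < M.length := by omega
      rw [PySem.List.pyRange_one_cons (by exact_mod_cast hklt), List.foldl_cons]
      have hdrop : M.drop k = M[k] :: M.drop (k + 1) := (List.getElem_cons_drop hklt).symm
      have hget : PySem.List.pyGetD M (k : Int) ((0 : Int), (0 : Int)) = M[k] := by
        rw [PySem.List.pyGetD_natCast, List.getD_eq_getElem?_getD, List.getElem?_eq_getElem hklt]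
        rfl
      have h1 : ((k : Int) + 1) = ((k + 1 : Nat) : Int) := by push_cast; ring
      have hget1 : (PySem.List.pyGetD M ((k : Int) + 1) ((0 : Int), (0 : Int))).1 =
          pvLook (M.drop (k + 1)) := by
        rcases hd : M.drop (k + 1) with _ | ⟨q, rest⟩
        · have hle : M.length ≤ k + 1 := by
            by_contra hc
            have := List.drop_eq_nil_iff.mp hd
            omega
          rw [h1, PySem.List.pyGetD_natCast, List.getD_eq_getElem?_getD, List.getElem?_eq_none hle]
          rfl
        · have hlt : k + 1 < M.length := by
            by_contra hc
            rw [List.drop_eq_nil_iff.mpr (by omega)] at hd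
            exact absurd hd (by simp)
          have h2 : M[k + 1] = q := by
            have h3 := (List.getElem_cons_drop hlt).trans hd
            injection h3
          rw [h1, PySem.List.pyGetD_natCast, List.getD_eq_getElem?_getD,
            List.getElem?_eq_getElem hlt, h2]
          rfl
      simp only [hget, hget1]
      rw [h1, ih (k + 1) (by omega) _ (by omega)]
      conv_rhs => rw [hdrop]
      simp only [pvGoA]
      split_ifs <;> rfl

lemma foldA_eq_pvGoA (M : List (Int × Int)) (s : Int × Int × Int × Int) :
    (PySem.List.pyRange 0 (M.length : Int) 1).foldl
      (fun (s : Int × Int × Int × Int) i =>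
        let num := s.1 + (PySem.List.pyGetD M i ((0 : Int), (0 : Int))).2
        if s.2.1 < num then
          (num, num, (PySem.List.pyGetD M i ((0 : Int), (0 : Int))).1,
            (PySem.List.pyGetD M (i + 1) ((0 : Int), (0 : Int))).1)
        else (num, s.2.1, s.2.2.1, s.2.2.2)) s
    = pvGoA M s := by
  simpa using foldA_eq_pvGoA_aux M 0 (by omega) s

-- trailing exits never beat the running maximum
lemma pvGoA_exits (exts : List Int) (num best bs be : Int) (h : num ≤ best) :
    pvGoA (exts.map (fun x => (x, (-1 : Int)))) (num, best, bs, be)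
      = (num - exts.length, best, bs, be) := by
  induction exts generalizing num with
  | nil => simp [pvGoA]
  | cons x exts ih =>
      simp only [List.map_cons, pvGoA]
      rw [if_neg (by omega), ih (num + -1) (by omega)]
      simp only [List.length_cons]
      congr 1
      push_cast
      ring

-- entries arriving after all exits are gone keep the count ≤ 0 and change nothing
lemma pvGoA_entries (ents : List Int) (num best bs be : Int)
    (h : num + ents.length ≤ 0) (h0 : 0 ≤ best) :
    pvGoA (ents.map (fun e => (e, (1 : Int)))) (num, best, bs, be)
      = (num + ents.length, best, bs, be) := by
  induction ents generalizing num with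
  | nil => simp [pvGoA]
  | cons e ents ih =>
      simp only [List.map_cons, pvGoA]
      rw [if_neg (by simp at h ⊢; omega), ih (num + 1) (by simp at h ⊢; omega)]
      simp only [List.length_cons]
      congr 1
      push_cast
      ring

lemma bLoop_nil_exts (ents : List Int) (num best bs be : Int)
    (h : num + ents.length ≤ 0) (h0 : 0 ≤ best) :
    bLoop ents [] num best bs be = (bs, be, best) := by
  induction ents generalizing num with
  | nil => rw [bLoop]
  | cons e ents ih =>
      rw [bLoop, if_neg (by simp at h; omega)]
      exact ih (num + 1) (by simp at h ⊢; omega)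

-- the two-pointer loop equals A's sweep over the merged event list
lemma bLoop_eq_pvGoA (ents exts : List Int) (num best bs be : Int)
    (h0 : 0 ≤ best) (h1 : num ≤ best) (h2 : (exts.length : Int) = (ents.length : Int) + num) :
    bLoop ents exts num best bs be =
      ((pvGoA (pvMerge ents exts) (num, best, bs, be)).2.2.1,
       (pvGoA (pvMerge ents exts) (num, best, bs, be)).2.2.2,
       (pvGoA (pvMerge ents exts) (num, best, bs, be)).2.1) := by
  induction ents, exts using pvMerge.induct generalizing num best bs be with
  | case1 ents =>
      rw [pvMerge, pvGoA_entries ents num best bs be (by simp at h2; omega) h0,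
        bLoop_nil_exts ents num best bs be (by simp at h2; omega) h0]
  | case2 x exts ih =>
      rw [pvMerge_nil_left, pvGoA_exits _ _ _ _ _ h1, bLoop]
  | case3 e ents x exts h ih =>
      rw [pvMerge, if_pos h, bLoop, if_pos h]
      simp only [pvGoA]
      rw [if_neg (by omega)]
      have hcast : num + (-1 : Int) = num - 1 := by ring
      rw [hcast, ih (num - 1) best bs be h0 (by omega) (by simp at h2 ⊢; omega)]
  | case4 e ents x exts h ih =>
      rw [pvMerge, if_neg h, bLoop, if_neg h]
      simp only [pvGoA]
      by_cases hc : best < num + 1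
      · rw [if_pos hc, if_pos hc]
        have h4 : pvLook (pvMerge ents (x :: exts)) = pvNext ents x := by
          rcases ents with _ | ⟨e', ents'⟩
          · simp [pvMerge, pvLook, pvNext]
          · rw [pvMerge]
            split_ifs with h5 <;> simp [pvLook, pvNext, min_def, h5]; omega
        rw [h4, ih (num + 1) (num + 1) e (pvNext ents x) (by omega) le_rfl
          (by simp at h2 ⊢; omega)]
      · rw [if_neg hc, if_neg hc]
        rw [ih (num + 1) best bs be h0 (by omega) (by simp at h2 ⊢; omega)]

-- ===== VERDICT (by name: the statement is the Claim_ definition above) =====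
theorem busiest_time_spec : Claim_equal_busiest_time := by
  intro xs _
  show busiest_time xs = busiest_time_alt xs
  unfold busiest_time busiest_time_alt
  simp only []
  rw [sorted2_eq_pvMerge, foldA_eq_pvGoA]
  rw [bLoop_eq_pvGoA _ _ 0 0 0 0 le_rfl le_rfl (by simp [PySem.List.length_sorted])]
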